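-- pv_equiv track=rewrite | github.com/LagunaKi/Fudan-Algorithm2025-lab2 | src/dna_matcher.py | kmer_minhash
-- ===== SOURCE A (Python) =====
-- HASH_SEEDS = [17, 31, 47, 73, 97, 131, 193, 257, 389, 521]
--
-- def kmer_minhash(s, num_hash=5):
--     # s: kmer字符串
--     # num_hash: 取前几个hash函数
--     hashes = []
--     for i in range(num_hash):
--         h = 0
--         for c in s:
--             h = (h * HASH_SEEDS[i] + ord(c)) % 1000000007
--         hashes.append(h)
--     return tuple(hashes)
-- ===== SOURCE B (Python) =====
-- HASH_SEEDS = [17, 31, 47, 73, 97, 131, 193, 257, 389, 521]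
--
-- def kmer_minhash(s, num_hash=5):
--     # Closed-form polynomial evaluation: h_i = sum(ord(c_j) * seed_i^(n-1-j)) mod M,
--     # using modular exponentiation instead of a Horner-style accumulator.
--     M = 1000000007
--     n = len(s)
--     return tuple(
--         sum(ord(c) * pow(HASH_SEEDS[i], n - 1 - j, M) for j, c in enumerate(s)) % M
--         for i in range(num_hash)
--     )
-- ===== Notes on version B (the rewrite author's own statement) =====
-- stated objective: alternative
-- what changed: B replaces A's Horner-style accumulator loop with a closed-form evaluation of the polynomial: each hash is computed as the sum of ord(c_j)*seed^(n-1-j) using modular exponentiation (pow with modulus), no running-hash state.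
import Mathlib
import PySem

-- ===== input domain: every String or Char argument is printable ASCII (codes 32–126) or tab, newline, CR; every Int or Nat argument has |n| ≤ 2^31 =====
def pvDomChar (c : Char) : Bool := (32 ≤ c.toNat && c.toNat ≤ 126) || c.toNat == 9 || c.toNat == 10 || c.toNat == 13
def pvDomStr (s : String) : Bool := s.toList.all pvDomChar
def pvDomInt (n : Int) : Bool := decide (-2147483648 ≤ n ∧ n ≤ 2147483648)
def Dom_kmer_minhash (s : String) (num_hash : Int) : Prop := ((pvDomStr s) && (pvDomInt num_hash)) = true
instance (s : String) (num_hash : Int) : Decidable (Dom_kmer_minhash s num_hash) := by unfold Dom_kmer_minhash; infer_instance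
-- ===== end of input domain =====

-- B replaces A's Horner accumulator with a closed-form polynomial sum using modular exponentiation (alternative algorithm, similar cost).

def hashSeeds : List Int := [17, 31, 47, 73, 97, 131, 193, 257, 389, 521]

-- ===== PORT A =====
-- for each i in range(num_hash): h = 0; for c in s: h = (h*HASH_SEEDS[i] + ord(c)) % M; append h
def kmer_minhash (s : String) (num_hash : Int) : List Int :=
  (PySem.List.pyRange 0 num_hash 1).foldl
    (fun hashes i =>
      hashes ++ [s.toList.foldl
        (fun h c => (h * PySem.List.pyGetD hashSeeds i 0 + (c.toNat : Int)) % 1000000007) 0])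
    []

-- ===== PORT B =====
-- tuple(sum(ord(c) * pow(HASH_SEEDS[i], n-1-j, M) for j, c in enumerate(s)) % M for i in range(num_hash))
-- pow(b, e, M) is ported as b ^ e % M (the corresponding mathematical function).
def kmer_minhash_alt (s : String) (num_hash : Int) : List Int :=
  let n := s.toList.length
  (PySem.List.pyRange 0 num_hash 1).map (fun i =>
    ((s.toList.zipIdx.map (fun p =>
        ((p.1.toNat : Int)) * (PySem.List.pyGetD hashSeeds i 0 ^ (n - 1 - p.2) % 1000000007))).sum)
      % 1000000007)

-- ===== PRECONDITION & SPEC =====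
-- Pre_ excludes exactly the inputs where Python A raises IndexError (HASH_SEEDS has 10 entries,
-- so num_hash > 10 with a non-empty s indexes past it); B raises there too.
def Pre_kmer_minhash (s : String) (num_hash : Int) : Prop := num_hash ≤ 10 ∨ s = ""
instance (s : String) (num_hash : Int) : Decidable (Pre_kmer_minhash s num_hash) := by
  unfold Pre_kmer_minhash; infer_instance
def pvWitness_kmer_minhash : String × Int := ("ACGT", 4)
def Spec_kmer_minhash (s : String) (num_hash : Int) (out : List Int) : Prop := out = kmer_minhash_alt s num_hash
instance (s : String) (num_hash : Int) (out : List Int) : Decidable (Spec_kmer_minhash s num_hash out) := by unfold Spec_kmer_minhash; infer_instance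

-- ===== CLAIM (what is proved, stated in full; the proofs are below) =====
def Claim_equal_kmer_minhash : Prop := ∀ (s : String) (num_hash : Int), Dom_kmer_minhash s num_hash → Pre_kmer_minhash s num_hash → Spec_kmer_minhash s num_hash (kmer_minhash s num_hash)

-- ===== LEMMAS AND PROOFS =====

-- the exact polynomial value Σ x_j * a^(len-1-j), defined structurally
def pvPoly (a : Int) : List Int → Int
  | [] => 0
  | x :: xs => x * a ^ xs.length + pvPoly a xs

-- Horner's rule: A's inner fold equals the polynomial value mod M.
lemma horner (a : Int) (xs : List Int) (h : Int) :
    xs.foldl (fun h x => (h * a + x) % 1000000007) (h % 1000000007)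
      = (h * a ^ xs.length + pvPoly a xs) % 1000000007 := by
  induction xs generalizing h with
  | nil => simp [pvPoly]
  | cons x xs ih =>
      simp only [List.foldl_cons]
      have e1 : (h % 1000000007 * a + x) % 1000000007 = (h * a + x) % 1000000007 := by
        rw [Int.add_emod, Int.mul_emod, Int.emod_emod_of_dvd _ (dvd_refl _),
          ← Int.mul_emod, ← Int.add_emod]
      rw [e1, ih (h * a + x)]
      congr 1
      simp [pvPoly, pow_succ]
      ring

-- B's sum (with inner pow-mod) is congruent to the polynomial value mod M.
lemma sum_modeq (a : Int) (xs : List Int) : ∀ (k n : Nat), n = k + xs.length →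
    ((xs.zipIdx k).map (fun p => p.1 * (a ^ (n - 1 - p.2) % 1000000007))).sum
      ≡ pvPoly a xs [ZMOD 1000000007] := by
  induction xs with
  | nil => intro k n hn; simp [pvPoly, Int.ModEq.refl]
  | cons x xs ih =>
      intro k n hn
      simp only [List.length_cons] at hn
      simp only [List.zipIdx_cons, List.map_cons, List.sum_cons, pvPoly]
      have he : n - 1 - k = xs.length := by omega
      refine Int.ModEq.add ?_ (ih (k + 1) n (by omega))
      rw [he]
      exact Int.ModEq.mul_left x (Int.emod_emod_of_dvd _ (dvd_refl _))

-- pointwise: A's Horner fold over the characters equals B's closed-form expression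
lemma pointwise (a : Int) (cs : List Char) :
    cs.foldl (fun h c => (h * a + (c.toNat : Int)) % 1000000007) 0
      = ((cs.zipIdx.map (fun p =>
            ((p.1.toNat : Int)) * (a ^ (cs.length - 1 - p.2) % 1000000007))).sum) % 1000000007 := by
  have hmap : cs.foldl (fun h c => (h * a + (c.toNat : Int)) % 1000000007) 0
      = (cs.map (fun c => (c.toNat : Int))).foldl (fun h x => (h * a + x) % 1000000007) 0 := by
    rw [List.foldl_map]
  have h0 : (0 : Int) = 0 % 1000000007 := rfl
  rw [hmap, h0, horner a (cs.map (fun c => (c.toNat : Int))) 0]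
  have hs := sum_modeq a (cs.map (fun c => (c.toNat : Int))) 0 cs.length (by simp)
  have hz : (cs.map (fun c => (c.toNat : Int))).zipIdx.map
        (fun p => p.1 * (a ^ (cs.length - 1 - p.2) % 1000000007))
      = cs.zipIdx.map (fun p => ((p.1.toNat : Int)) * (a ^ (cs.length - 1 - p.2) % 1000000007)) := by
    rw [List.zipIdx_map, List.map_map]
    rfl
  rw [hz] at hs
  unfold Int.ModEq at hs
  simpa using hs.symm

-- ===== VERDICT (by name: the statement is the Claim_ definition above) =====
theorem kmer_minhash_spec : Claim_equal_kmer_minhash := by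
  intro s num_hash _ _
  unfold Spec_kmer_minhash kmer_minhash kmer_minhash_alt
  rw [PySem.List.foldl_append_singleton_eq_map, List.nil_append]
  exact List.map_congr_left (fun i _ => pointwise (PySem.List.pyGetD hashSeeds i 0) s.toList)
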